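-- pv_equiv track=rewrite | github.com/dakidarts/opastro | src/horoscope_engine/interpretation/renderer.py | _decapitalize_leading
-- ===== SOURCE A (Python) =====
-- def _decapitalize_leading(text: str) -> str:
--     if not text:
--         return ""
--     for token in (
--         "The ",
--         "A ",
--         "An ",
--         "With ",
--         "Retrograde ",
--         "Ingress ",
--         "Eclipse ",
--         "Lunation ",
--         "House ",
--         "Aspect ",
--         "Trine ",
--         "Square ",
--         "Opposition ",
--     ):
--         if text.startswith(token):
--             return token.lower() + text[len(token) :]
--     return text
-- ===== SOURCE B (Python) =====
-- _KNOWN_LEADING = frozenset({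
--     "The", "A", "An", "With", "Retrograde", "Ingress", "Eclipse",
--     "Lunation", "House", "Aspect", "Trine", "Square", "Opposition",
-- })
--
--
-- def _decapitalize_leading(text: str) -> str:
--     if not text:
--         return ""
--     idx = text.find(" ")
--     if idx == -1:
--         return text
--     word = text[:idx]
--     if word in _KNOWN_LEADING:
--         return word.lower() + text[idx:]
--     return text
-- ===== Notes on version B (the rewrite author's own statement) =====
-- stated objective: idiomatic
-- what changed: Replaces the 13-way startswith prefix scan with a single first-space split and one frozenset lookup of the first word.
import Mathlib
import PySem

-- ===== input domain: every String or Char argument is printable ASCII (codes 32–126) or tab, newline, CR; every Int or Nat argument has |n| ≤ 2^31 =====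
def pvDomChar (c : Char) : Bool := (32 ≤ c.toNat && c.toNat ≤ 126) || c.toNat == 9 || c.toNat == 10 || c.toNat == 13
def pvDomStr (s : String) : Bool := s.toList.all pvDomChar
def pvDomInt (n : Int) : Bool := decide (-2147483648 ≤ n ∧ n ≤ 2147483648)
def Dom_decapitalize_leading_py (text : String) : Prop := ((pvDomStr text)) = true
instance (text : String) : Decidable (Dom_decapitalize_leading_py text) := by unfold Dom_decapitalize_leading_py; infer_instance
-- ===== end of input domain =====

-- B is the same function written idiomatically: split at the first space once and look the
-- first word up in a set, instead of scanning 13 startswith prefixes.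

-- ===== PORT A =====
-- the tuple of tokens A iterates over
def pvTokensA : List (List Char) :=
  ["The ".toList, "A ".toList, "An ".toList, "With ".toList, "Retrograde ".toList,
   "Ingress ".toList, "Eclipse ".toList, "Lunation ".toList, "House ".toList,
   "Aspect ".toList, "Trine ".toList, "Square ".toList, "Opposition ".toList]

-- A's for-loop: first token that is a prefix wins
def pvGoA : List (List Char) → List Char → List Char
  | [], l => l
  | t :: ts, l =>
    if PySem.Chars.startswith l t then
      PySem.Chars.lower t ++ PySem.Chars.slice l (some (t.length : Int)) none
    else pvGoA ts l

def decapitalize_leading_py (text : String) : String :=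
  if text = "" then "" else String.ofList (pvGoA pvTokensA text.toList)

-- ===== PORT B =====
def pvKnownWords : PySem.Set (List Char) :=
  PySem.Set.ofList
    ["The".toList, "A".toList, "An".toList, "With".toList, "Retrograde".toList,
     "Ingress".toList, "Eclipse".toList, "Lunation".toList, "House".toList,
     "Aspect".toList, "Trine".toList, "Square".toList, "Opposition".toList]

def decapitalize_leading_py_alt (text : String) : String :=
  if text = "" then ""
  else
    let l := text.toList
    let idx := PySem.Chars.find l [' ']
    if idx = -1 then text
    else
      let word := PySem.Chars.slice l none (some idx)
      if PySem.Set.contains pvKnownWords word then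
        String.ofList (PySem.Chars.lower word ++ PySem.Chars.slice l (some idx) none)
      else text

-- ===== PRECONDITION & SPEC =====
def Spec_decapitalize_leading_py (text : String) (out : String) : Prop := out = decapitalize_leading_py_alt text
instance (text : String) (out : String) : Decidable (Spec_decapitalize_leading_py text out) := by unfold Spec_decapitalize_leading_py; infer_instance

-- ===== CLAIM (what is proved, stated in full; the proofs are below) =====
def Claim_equal_decapitalize_leading_py : Prop := ∀ (text : String), Dom_decapitalize_leading_py text → Spec_decapitalize_leading_py text (decapitalize_leading_py text)

-- ===== LEMMAS AND PROOFS =====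

-- the raw word list behind pvKnownWords
def pvWordsB : List (List Char) :=
  ["The".toList, "A".toList, "An".toList, "With".toList, "Retrograde".toList,
   "Ingress".toList, "Eclipse".toList, "Lunation".toList, "House".toList,
   "Aspect".toList, "Trine".toList, "Square".toList, "Opposition".toList]

lemma pvKnownWords_eq : pvKnownWords = pvWordsB := by decide

lemma pvTokensA_eq : pvTokensA = pvWordsB.map (· ++ [' ']) := by decide

lemma pvWordsB_no_space : ∀ w ∈ pvWordsB, ' ' ∉ w := by decide

theorem singleton_prefix_drop (l : List Char) (i : Nat) (c : Char) :
    [c] <+: l.drop i ↔ l[i]? = some c := by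
  cases h : l.drop i with
  | nil => simp [List.drop_eq_nil_iff] at h
           constructor
           · rintro ⟨t, ht⟩; simp at ht
           · intro hc; have := List.getElem?_eq_none (l := l) (by omega : l.length ≤ i); simp [hc] at this
  | cons x xs =>
    have h0 : l[i]? = some x := by
      have := (List.getElem?_drop (xs := l) (i := i) (j := 0)).symm
      simp [h] at this; simpa using this
    constructor
    · rintro ⟨t, ht⟩
      rw [h0]; simp at ht; simp [ht.1]
    · intro hc; rw [h0] at hc; simp at hc; subst hc; exact ⟨xs, rfl⟩

theorem prefix_space_iff (l : List Char) (n : Nat) (w : List Char)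
    (hn : l[n]? = some ' ') (hfirst : ∀ i < n, l[i]? ≠ some ' ') (hw : ' ' ∉ w) :
    (w ++ [' ']) <+: l ↔ l.take n = w := by
  have hnlen : n < l.length := by
    by_contra hc
    rw [List.getElem?_eq_none (by omega)] at hn; simp at hn
  constructor
  · rintro ⟨t, ht⟩
    have hsp : l[w.length]? = some ' ' := by
      subst ht
      rw [List.append_assoc, List.getElem?_append_right (by omega)]
      simp
    have hne : n = w.length := by
      rcases Nat.lt_trichotomy n w.length with h | h | h
      · exfalso
        have : l[n]? = some w[n] := by
          subst ht
          rw [List.append_assoc, List.getElem?_append_left (by omega)]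
          simp [h]
        rw [this] at hn; simp at hn
        exact hw (hn ▸ List.getElem_mem h)
      · exact h
      · exact absurd hsp (hfirst _ h)
    subst hne
    subst ht
    rw [List.append_assoc, List.take_append_of_le_length (by omega)]
    simp
  · intro h
    have hlen : w.length = n := by
      rw [← h]; simp; omega
    have : l.take (n + 1) = w ++ [' '] := by
      rw [List.take_add_one, h, hn]; rfl
    rw [← this]; exact List.take_prefix _ _

theorem pvGoA_no_space (l : List Char) (hl : ' ' ∉ l) :
    ∀ ws : List (List Char), (∀ w ∈ ws, ' ' ∈ w) → pvGoA ws l = l := by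
  intro ws hws
  induction ws with
  | nil => rfl
  | cons t ts ih =>
    have hf : PySem.Chars.startswith l t = false := by
      by_contra hc
      simp at hc
      rw [PySem.Chars.startswith_iff] at hc
      exact hl (hc.mem (hws t (by simp)))
    simp [pvGoA, hf]
    exact ih (fun w hw => hws w (by simp [hw]))

theorem pvGoA_space (l : List Char) (n : Nat)
    (hn : l[n]? = some ' ') (hfirst : ∀ i < n, l[i]? ≠ some ' ') :
    ∀ ws : List (List Char), (∀ w ∈ ws, ' ' ∉ w) →
      pvGoA (ws.map (· ++ [' '])) l =
        if l.take n ∈ ws then PySem.Chars.lower (l.take n) ++ l.drop n else l := by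
  have hnlen : n < l.length := by
    by_contra hc
    rw [List.getElem?_eq_none (by omega)] at hn; simp at hn
  have hgetn : l[n] = ' ' := by
    rw [List.getElem?_eq_getElem hnlen] at hn; simpa using hn
  have hdrop : l.drop n = ' ' :: l.drop (n+1) := by
    rw [List.drop_eq_getElem_cons hnlen, hgetn]
  intro ws hws
  induction ws with
  | nil => simp [pvGoA]
  | cons w ws ih =>
    have hpre := prefix_space_iff l n w hn hfirst (hws w (by simp))
    by_cases h : l.take n = w
    · have hsw : PySem.Chars.startswith l (w ++ [' ']) = true := by
        rw [PySem.Chars.startswith_iff]; exact hpre.mpr h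
      have hlen : w.length = n := by rw [← h]; simp; omega
      simp only [List.map_cons, pvGoA, hsw, if_pos, h, List.mem_cons, true_or]
      have hslice : PySem.Chars.slice l (some (((w ++ [' ']).length : Nat) : Int)) none = l.drop (n+1) := by
        rw [PySem.Chars.slice_eq_listSlice, PySem.List.slice_from_natCast]
        simp [hlen]
      rw [hslice, hdrop]
      simp [PySem.Chars.lower]
      decide
    · have hsw : PySem.Chars.startswith l (w ++ [' ']) = false := by
        by_contra hc; simp at hc
        exact h (hpre.mp (PySem.Chars.startswith_iff _ _ |>.mp hc))
      simp only [List.map_cons, pvGoA, hsw, Bool.false_eq_true, if_false, List.mem_cons]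
      rw [ih (fun x hx => hws x (by simp [hx]))]
      by_cases hm : l.take n ∈ ws <;> simp [hm, h]

-- ===== VERDICT (by name: the statement is the Claim_ definition above) =====
theorem decapitalize_leading_py_spec : Claim_equal_decapitalize_leading_py := by
  intro text _
  unfold Spec_decapitalize_leading_py decapitalize_leading_py decapitalize_leading_py_alt
  by_cases he : text = ""
  · simp [he]
  · simp only [he, if_false]
    set l := text.toList with hl
    by_cases hf : PySem.Chars.find l [' '] = -1
    · -- no space anywhere: both sides return text unchanged
      simp only [hf, if_pos]
      have hnosp : ' ' ∉ l := by
        intro hm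
        rw [PySem.Chars.find_eq_neg_one_iff] at hf
        obtain ⟨s, t, hst⟩ := List.mem_iff_append.mp hm
        exact hf ⟨s, t, by simpa using hst.symm⟩
      rw [pvGoA_no_space l hnosp pvTokensA (by decide)]
      simp [hl]
    · -- first space at index n
      have hge : 0 ≤ PySem.Chars.find l [' '] := by
        have := PySem.Chars.neg_one_le_find l [' ']
        omega
      set n := (PySem.Chars.find l [' ']).toNat with hndef
      obtain ⟨hpre, hmin⟩ := PySem.Chars.find_spec (s := l) (sub := [' ']) hge
      have hn : l[n]? = some ' ' := (singleton_prefix_drop l n ' ').mp hpre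
      have hfirst : ∀ i < n, l[i]? ≠ some ' ' := by
        intro i hi hc
        exact hmin i hi ((singleton_prefix_drop l i ' ').mpr hc)
      have hcast : PySem.Chars.find l [' '] = (n : Int) := (Int.toNat_of_nonneg hge).symm
      have hA : pvGoA pvTokensA l =
          if l.take n ∈ pvWordsB then PySem.Chars.lower (l.take n) ++ l.drop n else l := by
        rw [pvTokensA_eq]
        exact pvGoA_space l n hn hfirst pvWordsB pvWordsB_no_space
      have hword : PySem.Chars.slice l none (some (PySem.Chars.find l [' '])) = l.take n := by
        rw [hcast, PySem.Chars.slice_eq_listSlice, PySem.List.slice_to_natCast]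
      have hrest : PySem.Chars.slice l (some (PySem.Chars.find l [' '])) none = l.drop n := by
        rw [hcast, PySem.Chars.slice_eq_listSlice, PySem.List.slice_from_natCast]
      simp only [hf, if_false, hword, hrest]
      by_cases hm : l.take n ∈ pvWordsB
      · have hc : PySem.Set.contains pvKnownWords (l.take n) = true := by
          rw [pvKnownWords_eq]
          simpa [PySem.Set.contains] using hm
        rw [hc, if_pos rfl, hA, if_pos hm]
      · have hc : PySem.Set.contains pvKnownWords (l.take n) = false := by
          rw [pvKnownWords_eq]
          simpa [PySem.Set.contains] using hm
        rw [hc, hA, if_neg hm]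
        simp [hl]
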